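-- pv_equiv track=rewrite | github.com/sai-phyo-hein/kg-processing | src/kg_extractor/utils/semantic_chunker.py | _get_last_sentences
-- ===== SOURCE A (Python) =====
-- def _get_last_sentences(text: str, max_sentences: int = 3) -> str:
--     """Extract last few sentences from text for context continuity.
--
--     Args:
--         text: Text to extract sentences from
--         max_sentences: Maximum number of sentences to extract
--
--     Returns:
--         Last few sentences as a string
--     """
--     if not text:
--         return ""
--
--     # Simple sentence splitting
--     sentences = []
--     current_sentence = []
--
--     for char in text:
--         current_sentence.append(char)
--         if char in ['.', '!', '?']:
--             sentence = ''.join(current_sentence).strip()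
--             if sentence:
--                 sentences.append(sentence)
--             current_sentence = []
--
--     # Add any remaining text
--     if current_sentence:
--         remaining = ''.join(current_sentence).strip()
--         if remaining:
--             sentences.append(remaining)
--
--     # Get last few sentences
--     last_sentences = sentences[-max_sentences:] if len(sentences) > max_sentences else sentences
--
--     return ' '.join(last_sentences)
-- ===== SOURCE B (Python) =====
-- def _get_last_sentences(text: str, max_sentences: int = 3) -> str:
--     """Index-based re-implementation: cut terminator-delimited chunks by
--     slicing, then strip/filter as a pipeline and slice the last few."""
--     if not text:
--         return ""
--     chunks = []
--     start = 0
--     for i, ch in enumerate(text):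
--         if ch in '.!?':
--             chunks.append(text[start:i + 1])
--             start = i + 1
--     if start < len(text):
--         chunks.append(text[start:])
--     sentences = [s for s in (c.strip() for c in chunks) if s]
--     return ' '.join(sentences[-max_sentences:])
-- ===== Notes on version B (the rewrite author's own statement) =====
-- stated objective: idiomatic
-- what changed: Replaces the char-by-char accumulator with strip-and-append inside the loop by an index-based chunk cutter (slices between terminator positions), a strip/filter comprehension pipeline, and an unconditional sentences[-max_sentences:] slice instead of A's length-conditional.
import Mathlib
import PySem

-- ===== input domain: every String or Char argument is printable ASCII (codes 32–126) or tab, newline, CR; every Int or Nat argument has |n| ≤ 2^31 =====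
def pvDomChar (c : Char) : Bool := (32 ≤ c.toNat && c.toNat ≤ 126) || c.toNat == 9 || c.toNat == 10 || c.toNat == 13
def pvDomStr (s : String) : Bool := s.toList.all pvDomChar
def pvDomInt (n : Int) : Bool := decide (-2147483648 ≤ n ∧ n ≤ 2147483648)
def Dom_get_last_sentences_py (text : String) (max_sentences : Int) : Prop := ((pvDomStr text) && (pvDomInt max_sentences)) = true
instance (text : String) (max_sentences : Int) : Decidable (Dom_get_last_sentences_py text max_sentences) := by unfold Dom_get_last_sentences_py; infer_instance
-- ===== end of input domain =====

-- B replaces A's char-accumulator loop by index-based chunk slicing plus a strip/filter pipeline (idiomatic; same cost).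

-- ===== PORT A =====
def pvIsTerm (c : Char) : Bool := c == '.' || c == '!' || c == '?'

-- A's loop body: current_sentence.append(char); if terminator: strip, append if nonempty, reset
def pvStepA (st : List (List Char) × List Char) (ch : Char) : List (List Char) × List Char :=
  let cur := st.2 ++ [ch]
  if pvIsTerm ch then
    let s := PySem.Chars.strip cur
    (if s ≠ [] then st.1 ++ [s] else st.1, [])
  else (st.1, cur)

-- A's tail handling: "Add any remaining text"
def pvFinishA (st : List (List Char) × List Char) : List (List Char) :=
  if st.2 ≠ [] then
    let remaining := PySem.Chars.strip st.2
    if remaining ≠ [] then st.1 ++ [remaining] else st.1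
  else st.1

def get_last_sentences_py (text : String) (max_sentences : Int) : String :=
  if text.toList = [] then "" else
  let st := text.toList.foldl pvStepA ([], [])
  let sentences := pvFinishA st
  let last_sentences :=
    if (sentences.length : Int) > max_sentences then
      PySem.List.slice sentences (some (-max_sentences)) none
    else sentences
  String.ofList (PySem.Chars.join [' '] last_sentences)

-- ===== PORT B =====
-- enumerate(text) (faithful: consecutive indices paired with chars)
def pvEnumFrom (k : Nat) : List Char → List (Nat × Char)
  | [] => []
  | c :: r => (k, c) :: pvEnumFrom (k + 1) r

-- B's loop body: on a terminator at i, cut the chunk text[start:i+1] and set start = i+1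
def pvStepB (cs : List Char) (st : List (List Char) × Nat) (p : Nat × Char) : List (List Char) × Nat :=
  if pvIsTerm p.2 then
    (st.1 ++ [PySem.List.slice cs (some (st.2 : Int)) (some ((p.1 : Int) + 1))], p.1 + 1)
  else st

-- B's tail handling: if start < len(text): append text[start:]
def pvFinishB (cs : List Char) (st : List (List Char) × Nat) : List (List Char) :=
  if st.2 < cs.length then st.1 ++ [PySem.List.slice cs (some (st.2 : Int)) none] else st.1

def get_last_sentences_py_alt (text : String) (max_sentences : Int) : String :=
  if text.toList = [] then "" else
  let cs := text.toList
  let chunks := pvFinishB cs ((pvEnumFrom 0 cs).foldl (pvStepB cs) ([], 0))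
  let sentences := (chunks.map PySem.Chars.strip).filter (· ≠ [])
  String.ofList (PySem.Chars.join [' '] (PySem.List.slice sentences (some (-max_sentences)) none))

-- ===== PRECONDITION & SPEC =====
def Spec_get_last_sentences_py (text : String) (max_sentences : Int) (out : String) : Prop := out = get_last_sentences_py_alt text max_sentences
instance (text : String) (max_sentences : Int) (out : String) : Decidable (Spec_get_last_sentences_py text max_sentences out) := by unfold Spec_get_last_sentences_py; infer_instance

-- ===== CLAIM (what is proved, stated in full; the proofs are below) =====
def Claim_equal_get_last_sentences_py : Prop := ∀ (text : String) (max_sentences : Int), Dom_get_last_sentences_py text max_sentences → Spec_get_last_sentences_py text max_sentences (get_last_sentences_py text max_sentences)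

-- ===== LEMMAS AND PROOFS =====

-- a list of chars with no sentence terminator
def pvNoTerm (u : List Char) : Prop := ∀ c ∈ u, pvIsTerm c = false

-- reference decomposition: maximal chunks each ending in a terminator, plus a nonempty terminator-free tail
def pvChunks : List Char → List (List Char)
  | [] => []
  | c :: r =>
    if pvIsTerm c then [c] :: pvChunks r
    else
      match pvChunks r with
      | [] => [[c]]
      | ch :: t => (c :: ch) :: t

def pvSents (l : List Char) : List (List Char) :=
  ((pvChunks l).map PySem.Chars.strip).filter (· ≠ [])

lemma pvChunks_term (u : List Char) (c : Char) (r : List Char)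
    (hu : pvNoTerm u) (hc : pvIsTerm c = true) :
    pvChunks (u ++ c :: r) = (u ++ [c]) :: pvChunks r := by
  induction u with
  | nil => simp [pvChunks, hc]
  | cons d u ih =>
      have hd : pvIsTerm d = false := hu d (by simp)
      have hu' : pvNoTerm u := fun x hx => hu x (by simp [hx])
      simp [pvChunks, hd, ih hu']

lemma pvChunks_noTerm (u : List Char) (hu : pvNoTerm u) (hne : u ≠ []) :
    pvChunks u = [u] := by
  induction u with
  | nil => cases hne rfl
  | cons c u ih =>
      have hc : pvIsTerm c = false := hu c (by simp)
      have hu' : pvNoTerm u := fun x hx => hu x (by simp [hx])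
      by_cases h : u = []
      · subst h; simp [pvChunks, hc]
      · simp [pvChunks, hc, ih hu' h]

lemma pvSents_cons_term (u : List Char) (c : Char) (r : List Char)
    (hu : pvNoTerm u) (hc : pvIsTerm c = true) :
    pvSents (u ++ c :: r) =
      (if PySem.Chars.strip (u ++ [c]) ≠ [] then [PySem.Chars.strip (u ++ [c])] else []) ++ pvSents r := by
  simp only [pvSents, pvChunks_term u c r hu hc, List.map_cons, List.filter_cons]
  by_cases hs : PySem.Chars.strip (u ++ [c]) = [] <;> simp [hs]

lemma pvLemA (r : List Char) : ∀ (sens : List (List Char)) (cur : List Char), pvNoTerm cur →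
    pvFinishA (r.foldl pvStepA (sens, cur)) = sens ++ pvSents (cur ++ r) := by
  induction r with
  | nil =>
      intro sens cur hcur
      by_cases h : cur = []
      · subst h; simp [pvFinishA, pvSents, pvChunks]
      · simp only [List.foldl_nil, List.append_nil, pvFinishA, pvSents,
          pvChunks_noTerm cur hcur h, List.map_cons, List.map_nil, List.filter_cons, List.filter_nil]
        by_cases hs : PySem.Chars.strip cur = [] <;> simp [h, hs]
  | cons c r ih =>
      intro sens cur hcur
      rw [List.foldl_cons]
      by_cases hc : pvIsTerm c = true
      · have hstep : pvStepA (sens, cur) c =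
            ((if PySem.Chars.strip (cur ++ [c]) ≠ [] then sens ++ [PySem.Chars.strip (cur ++ [c])] else sens), []) := by
          simp [pvStepA, hc]
        rw [hstep, ih _ [] (by intro x hx; cases hx)]
        rw [pvSents_cons_term cur c r hcur hc]
        by_cases hs : PySem.Chars.strip (cur ++ [c]) = [] <;> simp [hs]
      · have hcf : pvIsTerm c = false := by simpa using hc
        have hstep : pvStepA (sens, cur) c = (sens, cur ++ [c]) := by
          simp [pvStepA, hcf]
        have hcur' : pvNoTerm (cur ++ [c]) := by
          intro x hx
          rcases List.mem_append.1 hx with h | h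
          · exact hcur x h
          · simp at h; subst h; exact hcf
        rw [hstep, ih _ _ hcur']
        simp

lemma pvLemB (cs : List Char) : ∀ (r u : List Char) (k s : Nat) (chs : List (List Char)),
    cs.drop s = u ++ r → k = s + u.length → pvNoTerm u →
    pvFinishB cs ((pvEnumFrom k r).foldl (pvStepB cs) (chs, s)) = chs ++ pvChunks (u ++ r) := by
  intro r
  induction r with
  | nil =>
      intro u k s chs hdrop hk hu
      rw [List.append_nil] at hdrop ⊢
      simp only [pvEnumFrom, List.foldl_nil, pvFinishB]
      by_cases h : s < cs.length
      · have hne : u ≠ [] := by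
          intro hu0
          rw [hu0] at hdrop
          have := List.drop_eq_nil_iff.mp hdrop
          omega
        rw [pvChunks_noTerm u hu hne]
        rw [PySem.List.slice_from_natCast, hdrop]
        simp [h]
      · have hnil : cs.drop s = [] := List.drop_eq_nil_iff.mpr (by omega)
        rw [hdrop] at hnil
        simp [h, hnil, pvChunks]
  | cons c r ih =>
      intro u k s chs hdrop hk hu
      simp only [pvEnumFrom, List.foldl_cons]
      by_cases hc : pvIsTerm c = true
      · have hcast : ((k : Int) + 1) = (((k + 1 : Nat)) : Int) := by push_cast; ring
        have hslice : PySem.List.slice cs (some (s : Int)) (some ((k : Int) + 1)) = u ++ [c] := by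
          rw [hcast, PySem.List.slice_natCast, hdrop]
          have h1 : k + 1 - s = u.length + 1 := by omega
          rw [h1]
          rw [show u.length + 1 = u.length + 1 from rfl]
          rw [List.take_append]
          simp
        have hstep : pvStepB cs (chs, s) (k, c) = (chs ++ [u ++ [c]], k + 1) := by
          simp [pvStepB, hc, hslice]
        have hdrop' : cs.drop (k + 1) = [] ++ r := by
          have : cs.drop (k + 1) = (cs.drop s).drop (u.length + 1) := by
            rw [List.drop_drop]; congr 1; omega
          rw [this, hdrop]
          simp [List.drop_append]
        rw [hstep, ih [] (k + 1) (k + 1) _ hdrop' (by simp) (by intro x hx; cases hx)]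
        rw [pvChunks_term u c r hu hc]
        simp
      · have hcf : pvIsTerm c = false := by simpa using hc
        have hstep : pvStepB cs (chs, s) (k, c) = (chs, s) := by
          simp [pvStepB, hcf]
        have hdrop' : cs.drop s = (u ++ [c]) ++ r := by simpa using hdrop
        have hu' : pvNoTerm (u ++ [c]) := by
          intro x hx
          rcases List.mem_append.1 hx with h | h
          · exact hu x h
          · simp at h; subst h; exact hcf
        rw [hstep, ih (u ++ [c]) (k + 1) s _ hdrop' (by simp; omega) hu']
        simp

lemma pvSliceFull (S : List (List Char)) (m : Int) (h : (S.length : Int) ≤ m) :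
    PySem.List.slice S (some (-m)) none = S := by
  rcases lt_or_ge 0 m with hm | hm
  · have hk : m = ((m.toNat : Nat) : Int) := (Int.toNat_of_nonneg (le_of_lt hm)).symm
    have hk0 : 0 < m.toNat := by omega
    rw [hk, PySem.List.slice_from_neg_natCast _ _ hk0]
    have h0 : S.length - m.toNat = 0 := by omega
    rw [h0, List.drop_zero]
  · have hS : S = [] := List.eq_nil_of_length_eq_zero (by omega)
    subst hS
    rw [PySem.List.slice_some_none]
    simp

-- ===== VERDICT (by name: the statement is the Claim_ definition above) =====
theorem get_last_sentences_py_spec : Claim_equal_get_last_sentences_py := by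
  intro text max_sentences _
  unfold Spec_get_last_sentences_py get_last_sentences_py get_last_sentences_py_alt
  by_cases h : text.toList = []
  · simp [h]
  · rw [if_neg h, if_neg h]
    have hA : pvFinishA (text.toList.foldl pvStepA ([], [])) = pvSents text.toList := by
      have := pvLemA text.toList [] [] (by intro x hx; cases hx)
      simpa using this
    have hB : pvFinishB text.toList ((pvEnumFrom 0 text.toList).foldl (pvStepB text.toList) ([], 0)) = pvChunks text.toList := by
      have := pvLemB text.toList text.toList [] 0 0 [] (by simp) (by simp) (by intro x hx; cases hx)
      simpa using this
    simp only [hA, hB]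
    have hSent : ((pvChunks text.toList).map PySem.Chars.strip).filter (· ≠ []) = pvSents text.toList := rfl
    rw [hSent]
    by_cases hlen : ((pvSents text.toList).length : Int) > max_sentences
    · rw [if_pos hlen]
    · rw [if_neg hlen, pvSliceFull _ _ (by omega)]
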